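-- pv_equiv track=rewrite | github.com/cVoltic/Data_Proj | PythonExp/StringSearch.py | StrDecomposition
-- ===== SOURCE A (Python) =====
-- def StrDecomposition(main,sub):
-- 	#create an empy list store our result
-- 	result = []
--
-- 	#obviously we need to run through each sub-string
-- 	for i,n in enumerate(sub):
-- 		#getting the length of the substring we are working with
-- 		n_len = len(n)
--
-- 		#now, let's check for the existing of this string in the main string
-- 		j=0
-- 		while(j < len(main)):
-- 			#first case senario,
-- 			#the end of main string is reach but still cant find the sub string
-- 			#append false to the list and breate out of loop
-- 			if(j == len(main)-1):
-- 				result.append('false')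
-- 				break
--
-- 			#if the string exist, append true to our result list and break out of loop
-- 			if(n == main[j:j+n_len]):
-- 				result.append('true')
-- 				break
-- 			#if the string is not found,
-- 			#but it is not the end of main string
-- 			#scan the next element of the loop
-- 			elif (j != len(main)-1):
-- 				j+=1
--
-- 	#ofcourse we return the list here
-- 	return result
-- ===== SOURCE B (Python) =====
-- def StrDecomposition(main, sub):
--     # For each substring, report whether it occurs anywhere in main.
--     return ['true' if n in main else 'false' for n in sub]
-- ===== Notes on version B (the rewrite author's own statement) =====
-- stated objective: idiomatic
-- what changed: Replaced the hand-rolled enumerate/while scan with index bookkeeping by a single comprehension using Python's substring operator 'in' per query string; 'in' runs CPython's C-level two-way search instead of an interpreted per-index slice-and-compare loop.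
-- intended difference: On inputs where main is empty and sub is non-empty A returns [] (its while loop never runs), and on inputs where some query occurs in main only at start index len(main)-1 A reports 'false' for it (its end-of-string check fires before the match check); B returns one answer per query and 'true' for every query that actually occurs in main, which is the intended membership result. — e.g. on StrDecomposition("ab", ["b"]): A returns ["false"], B returns ["true"]
import Mathlib
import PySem

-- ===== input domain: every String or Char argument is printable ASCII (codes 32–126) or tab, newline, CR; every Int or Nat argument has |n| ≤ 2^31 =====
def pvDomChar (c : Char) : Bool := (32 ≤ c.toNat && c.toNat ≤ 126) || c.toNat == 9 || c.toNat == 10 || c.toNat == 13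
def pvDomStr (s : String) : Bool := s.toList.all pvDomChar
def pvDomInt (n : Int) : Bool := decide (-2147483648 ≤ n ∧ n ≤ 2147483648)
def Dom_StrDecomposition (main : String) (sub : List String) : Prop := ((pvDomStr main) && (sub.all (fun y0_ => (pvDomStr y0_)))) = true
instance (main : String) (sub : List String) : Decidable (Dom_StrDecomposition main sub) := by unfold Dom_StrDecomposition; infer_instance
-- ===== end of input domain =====

-- B replaces A's hand-rolled enumerate/while scan by one membership test ('n in main') per query string (idiomatic).

-- ===== PORT A =====
-- the inner 'while j < len(main)' loop of A for one substring n, fuel = number of remaining iterations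
-- (the loop increments j by 1 each pass, so fuel m.length - j is exact); returns the string appended, if any
def StrDecompLoop (m n : List Char) (j : Nat) : Nat → Option String
  | 0 => none                                  -- j < len(main) is false: the loop (and function) ends with no append
  | fuel + 1 =>
    if j < m.length then
      if j == m.length - 1 then some "false"
      else if PySem.List.slice m (some (j : Int)) (some ((j : Int) + (n.length : Int))) == n then some "true"
      else StrDecompLoop m n (j + 1) fuel      -- elif j != len(main)-1: j += 1 (always taken: j == len-1 was handled above)
    else none

def StrDecomposition (main : String) (sub : List String) : List String :=
  -- result = []; for i, n in enumerate(sub): <while loop from j = 0>; return result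
  sub.foldl (fun result n =>
    match StrDecompLoop main.toList n.toList 0 main.toList.length with
    | some s => result ++ [s]
    | none => result) []

-- ===== PORT B =====
def StrDecomposition_alt (main : String) (sub : List String) : List String :=
  sub.map (fun n => if PySem.Str.isIn n main then "true" else "false")

-- ===== PRECONDITION & SPEC =====
-- On inputs where main is empty and sub is non-empty A returns [] (its while loop never runs), and on inputs where
-- some query occurs in main only at start index len(main)-1 A reports 'false' for it (its end-of-string check fires
-- before the match check); B returns one answer per query and 'true' for every query that actually occurs in main,
-- which is the intended membership result.
def D_StrDecomposition (main : String) (sub : List String) : Prop :=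
  (main = "" ∧ sub ≠ []) ∨
    ∃ n ∈ sub, n.toList <:+: main.toList ∧
      ¬ ∃ j : Nat, j < main.toList.length - 1 ∧ n.toList <+: main.toList.drop j
instance (main : String) (sub : List String) : Decidable (D_StrDecomposition main sub) := by
  unfold D_StrDecomposition; infer_instance

def Spec_StrDecomposition (main : String) (sub : List String) (out : List String) : Prop :=
  ¬ D_StrDecomposition main sub → out = StrDecomposition_alt main sub
instance (main : String) (sub : List String) (out : List String) : Decidable (Spec_StrDecomposition main sub out) := by
  unfold Spec_StrDecomposition; infer_instance

def pvDiffWitness_StrDecomposition : String × List String := ("ab", ["b"])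
def pvDiffWitnessOut_StrDecomposition : (List String) × (List String) := (["false"], ["true"])

-- ===== CLAIM (what is proved, stated in full; the proofs are below) =====
def Claim_unchanged_StrDecomposition : Prop := ∀ (main : String) (sub : List String), Dom_StrDecomposition main sub → Spec_StrDecomposition main sub (StrDecomposition main sub)
def Claim_changed_StrDecomposition : Prop := Dom_StrDecomposition (pvDiffWitness_StrDecomposition.1) (pvDiffWitness_StrDecomposition.2) ∧ D_StrDecomposition (pvDiffWitness_StrDecomposition.1) (pvDiffWitness_StrDecomposition.2) ∧ StrDecomposition (pvDiffWitness_StrDecomposition.1) (pvDiffWitness_StrDecomposition.2) = pvDiffWitnessOut_StrDecomposition.1 ∧ StrDecomposition_alt (pvDiffWitness_StrDecomposition.1) (pvDiffWitness_StrDecomposition.2) = pvDiffWitnessOut_StrDecomposition.2 ∧ pvDiffWitnessOut_StrDecomposition.1 ≠ pvDiffWitnessOut_StrDecomposition.2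
def Claim_exact_StrDecomposition : Prop := ∀ (main : String) (sub : List String), Dom_StrDecomposition main sub → D_StrDecomposition main sub → StrDecomposition main sub ≠ StrDecomposition_alt main sub

-- ===== LEMMAS AND PROOFS =====

-- 'main[j:j+len(n)] == n' says exactly 'n is a prefix of main[j:]' (the slice clamps at the end)
lemma slice_eq_iff_prefix_drop (m n : List Char) (j : Nat) :
    PySem.List.slice m (some (j : Int)) (some ((j : Int) + (n.length : Int))) = n ↔ n <+: m.drop j := by
  rw [PySem.List.slice_natCast_add]
  constructor
  · intro h; exact h ▸ List.take_prefix _ _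
  · intro h
    obtain ⟨t, ht⟩ := h
    rw [← ht]; simp

-- D's early-occurrence condition as a plain decidable Bool, to state loop_spec without classical ifs
def earlyFrom (m n : List Char) (j : Nat) : Bool :=
  decide (∃ i : Nat, i < m.length - 1 ∧ j ≤ i ∧ n <+: m.drop i)

lemma loop_spec (m n : List Char) :
    ∀ fuel j, m.length - j ≤ fuel → j < m.length →
      StrDecompLoop m n j fuel = some (if earlyFrom m n j then "true" else "false") := by
  intro fuel
  induction fuel with
  | zero => intro j h hj; omega
  | succ f ih =>
    intro j h hj
    rw [StrDecompLoop, if_pos hj]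
    by_cases hlast : j = m.length - 1
    · rw [if_pos (by simpa using hlast)]
      have : earlyFrom m n j = false := by
        simp only [earlyFrom, decide_eq_false_iff_not]
        rintro ⟨i, h1, h2, -⟩; omega
      rw [this]; rfl
    · rw [if_neg (by simpa using hlast)]
      by_cases hm : PySem.List.slice m (some (j : Int)) (some ((j : Int) + (n.length : Int))) = n
      · rw [if_pos (by simpa using hm)]
        have : earlyFrom m n j = true := by
          simp only [earlyFrom, decide_eq_true_iff]
          exact ⟨j, by omega, le_refl j, (slice_eq_iff_prefix_drop m n j).1 hm⟩
        rw [this]; rfl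
      · rw [if_neg (by simpa using hm)]
        rw [ih (j + 1) (by omega) (by omega)]
        have hnp : ¬ n <+: m.drop j := fun hp => hm ((slice_eq_iff_prefix_drop m n j).2 hp)
        have : earlyFrom m n (j + 1) = earlyFrom m n j := by
          simp only [earlyFrom, decide_eq_decide]
          constructor
          · rintro ⟨i, h1, h2, h3⟩; exact ⟨i, h1, by omega, h3⟩
          · rintro ⟨i, h1, h2, h3⟩
            refine ⟨i, h1, ?_, h3⟩
            rcases Nat.lt_or_ge j i with h' | h'
            · omega
            · exact absurd ((by omega : i = j) ▸ h3) hnp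
        rw [this]

lemma A_eq_map (main : String) (sub : List String) (h : main.toList ≠ []) :
    StrDecomposition main sub =
      sub.map (fun n => if earlyFrom main.toList n.toList 0 then "true" else "false") := by
  unfold StrDecomposition
  have hlen : 0 < main.toList.length := List.length_pos_iff.mpr h
  calc sub.foldl (fun result n =>
        match StrDecompLoop main.toList n.toList 0 main.toList.length with
        | some s => result ++ [s]
        | none => result) []
      = sub.foldl (fun r n =>
          r ++ [if earlyFrom main.toList n.toList 0 then "true" else "false"]) [] := by
        apply List.foldl_ext
        intro r n _
        rw [loop_spec main.toList n.toList main.toList.length 0 (by omega) hlen]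
    _ = _ := by
        rw [PySem.List.foldl_append_singleton_eq_map
          (fun n : String => if earlyFrom main.toList n.toList 0 then "true" else "false") sub []]
        rfl

lemma A_empty (main : String) (sub : List String) (h : main.toList = []) :
    StrDecomposition main sub = [] := by
  unfold StrDecomposition
  rw [h]
  simp [StrDecompLoop]

lemma B_eq_map (main : String) (sub : List String) :
    StrDecomposition_alt main sub =
      sub.map (fun n => if n.toList <:+: main.toList then "true" else "false") := by
  unfold StrDecomposition_alt
  apply List.map_congr_left
  intro n _
  by_cases h : n.toList <:+: main.toList
  · rw [if_pos ((PySem.Str.isIn_iff_infix n main).mpr h), if_pos h]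
  · rw [if_neg (fun hb => h ((PySem.Str.isIn_iff_infix n main).mp hb)), if_neg h]

lemma infix_iff_exists_drop (n m : List Char) :
    n <:+: m ↔ ∃ j : Nat, n <+: m.drop j := by
  rw [← PySem.Chars.isIn_iff_infix, ← PySem.Chars.exists_prefix_drop_iff_isIn]

lemma toList_eq_nil_iff (s : String) : s.toList = [] ↔ s = "" := by
  constructor
  · intro h
    have := congrArg String.ofList h
    simpa [String.ofList_toList] using this
  · intro h; simp [h]

-- ===== VERDICT (by name: the statement is the Claim_ definition above) =====
theorem StrDecomposition_spec : Claim_unchanged_StrDecomposition := by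
  intro main sub _ hD
  show StrDecomposition main sub = StrDecomposition_alt main sub
  by_cases hm : main.toList = []
  · have hsub : sub = [] := by
      by_contra hs
      exact hD (Or.inl ⟨(toList_eq_nil_iff main).mp hm, hs⟩)
    subst hsub
    rw [A_empty main [] hm]; rfl
  · rw [A_eq_map main sub hm, B_eq_map main sub]
    apply List.map_congr_left
    intro n hn
    have hiff : earlyFrom main.toList n.toList 0 = true ↔ n.toList <:+: main.toList := by
      simp only [earlyFrom, decide_eq_true_iff]
      constructor
      · rintro ⟨i, h1, -, h3⟩; exact (infix_iff_exists_drop _ _).mpr ⟨i, h3⟩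
      · intro hin
        by_contra hne
        refine hD (Or.inr ⟨n, hn, hin, ?_⟩)
        rintro ⟨j, hj1, hj2⟩
        exact hne ⟨j, hj1, Nat.zero_le j, hj2⟩
    by_cases he : earlyFrom main.toList n.toList 0
    · rw [if_pos he, if_pos (hiff.mp he)]
    · rw [if_neg he, if_neg (fun hin => he (hiff.mpr hin))]

theorem StrDecomposition_changed : Claim_changed_StrDecomposition := by
  unfold Claim_changed_StrDecomposition; decide

theorem StrDecomposition_tight : Claim_exact_StrDecomposition := by
  intro main sub _ hD heq
  by_cases hm : main.toList = []
  · -- A returns [], B returns one entry per element of sub, and sub ≠ []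
    have hsub : sub ≠ [] := by
      rcases hD with ⟨-, hs⟩ | ⟨n, hn, -, -⟩
      · exact hs
      · exact List.ne_nil_of_mem hn
    rw [A_empty main sub hm, B_eq_map main sub] at heq
    exact hsub (List.map_eq_nil_iff.mp heq.symm)
  · rcases hD with ⟨h0, -⟩ | ⟨n, hn, hin, hne⟩
    · exact hm (by simp [h0])
    · rw [A_eq_map main sub hm, B_eq_map main sub] at heq
      have hpt := (List.map_eq_map_iff.mp heq) n hn
      have he : earlyFrom main.toList n.toList 0 = false := by
        simp only [earlyFrom, decide_eq_false_iff_not]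
        rintro ⟨i, h1, -, h3⟩
        exact hne ⟨i, h1, h3⟩
      rw [he, if_pos hin] at hpt
      exact absurd hpt (by decide)
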